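-- pv_equiv track=rewrite | github.com/NakuDev/DactyloFun | main.py | check_input_text
-- ===== SOURCE A (Python) =====
-- WHITE = (255, 255, 255)
--
-- def check_input_text(full_input_text, original_text):
--     checked_text = []
--     for i, char in enumerate(full_input_text):
--         if i < len(original_text) and char == original_text[i]:
--             checked_text.append((char, (0, 255, 0)))  # Vert
--         else:
--             checked_text.append((char, (255, 0, 0)))  # Rouge
--
--     for i in range(len(full_input_text), len(original_text)):
--         checked_text.append((original_text[i], WHITE))  # Blanc
--
--     return checked_text
-- ===== SOURCE B (Python) =====
-- def check_input_text(full_input_text, original_text):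
--     checked_text = []
--     it_c = iter(full_input_text)
--     it_o = iter(original_text)
--     while True:
--         c = next(it_c, None)
--         o = next(it_o, None)
--         if c is None and o is None:
--             return checked_text
--         if c is None:
--             checked_text.append((o, (255, 255, 255)))
--         elif o is None:
--             checked_text.append((c, (255, 0, 0)))
--         elif c == o:
--             checked_text.append((c, (0, 255, 0)))
--         else:
--             checked_text.append((c, (255, 0, 0)))
-- ===== Notes on version B (the rewrite author's own statement) =====
-- stated objective: alternative
-- what changed: Replaces A's two index-based loops (enumerate with a bounds guard plus a separate range tail loop) by a single hand-rolled zip-longest pass over two character iterators, so no indexing or length arithmetic remains.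
import Mathlib
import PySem

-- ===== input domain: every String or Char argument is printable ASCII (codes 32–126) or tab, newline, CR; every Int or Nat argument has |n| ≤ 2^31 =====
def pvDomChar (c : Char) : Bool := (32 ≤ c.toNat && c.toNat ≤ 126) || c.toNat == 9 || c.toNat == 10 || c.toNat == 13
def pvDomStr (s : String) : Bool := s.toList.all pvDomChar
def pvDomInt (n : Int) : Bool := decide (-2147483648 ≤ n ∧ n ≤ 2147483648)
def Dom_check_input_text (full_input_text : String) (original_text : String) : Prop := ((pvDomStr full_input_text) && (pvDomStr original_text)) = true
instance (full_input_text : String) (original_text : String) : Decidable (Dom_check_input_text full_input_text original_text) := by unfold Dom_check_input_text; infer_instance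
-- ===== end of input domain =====

-- B replaces A's two index-based loops by a single zip-longest-style pairwise pass over the two character sequences (objective: alternative decomposition, same cost).


-- ===== PORT A =====
-- Literal port of A: first loop 'for i, char in enumerate(full_input_text)' with the
-- bounds-guarded comparison, then 'for i in range(len(full_input_text), len(original_text))'.
def check_input_text (full_input_text : String) (original_text : String) : List (String × (Int × Int × Int)) :=
  (PySem.List.pyRange (full_input_text.toList.length : Int) (original_text.toList.length : Int) 1).foldl
    (fun acc i => acc ++ [(String.ofList [PySem.List.pyGetD original_text.toList i ' '], ((255 : Int), (255 : Int), (255 : Int)))])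
    ((PySem.List.enumerate full_input_text.toList 0).foldl
      (fun acc p =>
        if p.1 < (original_text.toList.length : Int) ∧ p.2 = PySem.List.pyGetD original_text.toList p.1 ' ' then
          acc ++ [(String.ofList [p.2], ((0 : Int), (255 : Int), (0 : Int)))]
        else
          acc ++ [(String.ofList [p.2], ((255 : Int), (0 : Int), (0 : Int)))]) [])

-- ===== PORT B =====
-- B: one pairwise pass over both character streams (zip-longest); the two exhausted-stream
-- cases are the white tail and the red overflow.
def checkZip : List Char → List Char → List (String × (Int × Int × Int))
  | [], [] => []
  | [], o :: os => (String.ofList [o], ((255 : Int), (255 : Int), (255 : Int))) :: checkZip [] os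
  | c :: cs, [] => (String.ofList [c], ((255 : Int), (0 : Int), (0 : Int))) :: checkZip cs []
  | c :: cs, o :: os =>
      (if c = o then (String.ofList [c], ((0 : Int), (255 : Int), (0 : Int)))
       else (String.ofList [c], ((255 : Int), (0 : Int), (0 : Int)))) :: checkZip cs os

def check_input_text_alt (full_input_text : String) (original_text : String) : List (String × (Int × Int × Int)) :=
  checkZip full_input_text.toList original_text.toList

-- ===== PRECONDITION & SPEC =====
def Spec_check_input_text (full_input_text : String) (original_text : String) (out : List (String × (Int × Int × Int))) : Prop := out = check_input_text_alt full_input_text original_text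
instance (full_input_text : String) (original_text : String) (out : List (String × (Int × Int × Int))) : Decidable (Spec_check_input_text full_input_text original_text out) := by unfold Spec_check_input_text; infer_instance

-- ===== CLAIM (what is proved, stated in full; the proofs are below) =====
def Claim_equal_check_input_text : Prop := ∀ (full_input_text : String) (original_text : String), Dom_check_input_text full_input_text original_text → Spec_check_input_text full_input_text original_text (check_input_text full_input_text original_text)

-- ===== LEMMAS AND PROOFS =====

-- the per-cell functions of A, named for the proofs
def cellA (os : List Char) (p : Int × Char) : String × (Int × Int × Int) :=
  if p.1 < (os.length : Int) ∧ p.2 = PySem.List.pyGetD os p.1 ' ' then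
    (String.ofList [p.2], ((0 : Int), (255 : Int), (0 : Int)))
  else
    (String.ofList [p.2], ((255 : Int), (0 : Int), (0 : Int)))

def whiteCell (c : Char) : String × (Int × Int × Int) :=
  (String.ofList [c], ((255 : Int), (255 : Int), (255 : Int)))

def redCell (c : Char) : String × (Int × Int × Int) :=
  (String.ofList [c], ((255 : Int), (0 : Int), (0 : Int)))

lemma checkA_eq (f o : String) :
    check_input_text f o =
      (PySem.List.enumerate f.toList 0).map (cellA o.toList) ++ (o.toList.drop f.toList.length).map whiteCell := by
  unfold check_input_text
  have h1 : (PySem.List.enumerate f.toList 0).foldl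
      (fun acc p =>
        if p.1 < (o.toList.length : Int) ∧ p.2 = PySem.List.pyGetD o.toList p.1 ' ' then
          acc ++ [(String.ofList [p.2], ((0 : Int), (255 : Int), (0 : Int)))]
        else
          acc ++ [(String.ofList [p.2], ((255 : Int), (0 : Int), (0 : Int)))]) [] =
      [] ++ (PySem.List.enumerate f.toList 0).map (cellA o.toList) := by
    rw [← PySem.List.foldl_append_singleton_eq_map]
    congr 1
    funext acc p
    unfold cellA
    split_ifs <;> rfl
  rw [h1]
  have h2 : (PySem.List.pyRange (f.toList.length : Int) (o.toList.length : Int) 1).map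
      (fun i => (String.ofList [PySem.List.pyGetD o.toList i ' '], ((255 : Int), (255 : Int), (255 : Int)))) =
      ((PySem.List.pyRange (f.toList.length : Int) (o.toList.length : Int) 1).map
        (fun i => PySem.List.pyGetD o.toList i ' ')).map whiteCell := by
    rw [List.map_map]; rfl
  have h3 : ∀ init : List (String × (Int × Int × Int)),
      (PySem.List.pyRange (f.toList.length : Int) (o.toList.length : Int) 1).foldl
        (fun acc i => acc ++ [(String.ofList [PySem.List.pyGetD o.toList i ' '], ((255 : Int), (255 : Int), (255 : Int)))]) init =
      init ++ (PySem.List.pyRange (f.toList.length : Int) (o.toList.length : Int) 1).map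
        (fun i => (String.ofList [PySem.List.pyGetD o.toList i ' '], ((255 : Int), (255 : Int), (255 : Int)))) := by
    intro init
    rw [← PySem.List.foldl_append_singleton_eq_map]
  rw [h3, h2, PySem.List.map_pyGetD_pyRange' o.toList ' ' (by positivity : (0:Int) ≤ (f.toList.length : Int))]
  simp

lemma checkZip_nil_right (cs : List Char) : checkZip cs [] = cs.map redCell := by
  induction cs with
  | nil => simp [checkZip]
  | cons c cs ih => simp [checkZip, ih, redCell]

lemma checkZip_nil_left (os : List Char) : checkZip [] os = os.map whiteCell := by
  induction os with
  | nil => simp [checkZip]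
  | cons o os ih => simp [checkZip, ih, whiteCell]

lemma map_cellA_nil (cs : List Char) (s : ℕ) :
    (PySem.List.enumerate cs (s : Int)).map (cellA []) = cs.map redCell := by
  induction cs generalizing s with
  | nil => rfl
  | cons c cs ih =>
      rw [PySem.List.enumerate_cons, List.map_cons, List.map_cons,
        show ((s : Int) + 1) = ((s + 1 : ℕ) : Int) from by push_cast; ring, ih (s + 1)]
      congr 1

lemma map_cellA_shift (cs : List Char) (o : Char) (os : List Char) (s : ℕ) :
    (PySem.List.enumerate cs ((s : Int) + 1)).map (cellA (o :: os)) =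
      (PySem.List.enumerate cs (s : Int)).map (cellA os) := by
  induction cs generalizing s with
  | nil => rfl
  | cons c cs ih =>
      rw [PySem.List.enumerate_cons, PySem.List.enumerate_cons, List.map_cons, List.map_cons]
      have hs : ((s : Int) + 1 + 1) = ((s + 1 : ℕ) : Int) + 1 := by push_cast; ring
      rw [hs, ih (s + 1), show (((s + 1 : ℕ)) : Int) = (s : Int) + 1 from by push_cast; ring]
      congr 1
      unfold cellA
      have hidx : PySem.List.pyGetD (o :: os) ((s : Int) + 1) ' ' = PySem.List.pyGetD os (s : Int) ' ' := by
        rw [show ((s : Int) + 1) = ((s + 1 : ℕ) : Int) from by push_cast; ring,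
          PySem.List.pyGetD_natCast, List.getD_cons_succ, ← PySem.List.pyGetD_natCast]
      rw [hidx]
      have hlen : ((s : Int) + 1 < ((o :: os).length : Int)) ↔ ((s : Int) < (os.length : Int)) := by
        simp only [List.length_cons]
        push_cast
        omega
      by_cases h : (s : Int) < (os.length : Int) ∧ c = PySem.List.pyGetD os (s : Int) ' '
      · rw [if_pos ⟨hlen.mpr h.1, h.2⟩, if_pos h]
      · rw [if_neg (fun hc => h ⟨hlen.mp hc.1, hc.2⟩), if_neg h]

lemma main_eq (cs os : List Char) :
    (PySem.List.enumerate cs 0).map (cellA os) ++ (os.drop cs.length).map whiteCell = checkZip cs os := by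
  induction cs generalizing os with
  | nil => simp [checkZip_nil_left]
  | cons c cs ih =>
      cases os with
      | nil =>
          have h0 : ((0 : Int)) = ((0 : ℕ) : Int) := by norm_num
          rw [List.drop_nil, List.map_nil, List.append_nil, h0, map_cellA_nil, checkZip_nil_right]
      | cons o os' =>
          rw [PySem.List.enumerate_cons, List.map_cons]
          have h0 : ((0 : Int) + 1) = ((0 : ℕ) : Int) + 1 := by norm_num
          rw [h0, map_cellA_shift]
          have hhead : cellA (o :: os') (0, c) =
              (if c = o then (String.ofList [c], ((0 : Int), (255 : Int), (0 : Int)))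
               else (String.ofList [c], ((255 : Int), (0 : Int), (0 : Int)))) := by
            unfold cellA
            have : PySem.List.pyGetD (o :: os') (0 : Int) ' ' = o := by
              simp [PySem.List.pyGetD_zero_cons]
            simp [this]
          rw [hhead, checkZip]
          simp only [List.length_cons, List.drop_succ_cons, Nat.cast_zero]
          rw [List.cons_append, ih os']

-- ===== VERDICT (by name: the statement is the Claim_ definition above) =====
theorem check_input_text_spec : Claim_equal_check_input_text := by
  intro f o _
  unfold Spec_check_input_text check_input_text_alt
  rw [checkA_eq, main_eq]
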